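-- pv_equiv track=rewrite | github.com/rnaksdl/IR-See | scripts/400_guess.py | prioritize_same_digit_pins
-- ===== SOURCE A (Python) =====
-- def prioritize_same_digit_pins(pin_scores, is_same_digit, pin_length):
--     if not is_same_digit:
--         return pin_scores
--     priority_pins = [str(digit)*pin_length for digit in range(1, 10)] + ["0"*pin_length]
--     prioritized_scores = []
--     non_priority_pins = []
--     for pin, score in pin_scores:
--         if pin not in priority_pins:
--             non_priority_pins.append((pin, score))
--     for p_pin in priority_pins:
--         for pin, score in pin_scores:
--             if pin == p_pin:
--                 prioritized_scores.append((pin, score))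
--                 break
--     prioritized_scores.extend(non_priority_pins)
--     return prioritized_scores
-- ===== SOURCE B (Python) =====
-- def prioritize_same_digit_pins(pin_scores, is_same_digit, pin_length):
--     if not is_same_digit:
--         return pin_scores
--     priority_pins = [str(d) * pin_length for d in range(1, 10)] + ["0" * pin_length]
--     pset = set(priority_pins)
--     first_seen = {}
--     non_priority = []
--     for pin, score in pin_scores:
--         if pin in pset:
--             if pin not in first_seen:
--                 first_seen[pin] = (pin, score)
--         else:
--             non_priority.append((pin, score))
--     return [first_seen[p] for p in priority_pins if p in first_seen] + non_priority
-- ===== Notes on version B (the rewrite author's own statement) =====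
-- stated objective: faster
-- what changed: Replaces A's second pass of 10 linear scans over pin_scores (one per priority pin) with a single pass that records the first occurrence of each priority pin in a dict and collects non-priority pairs, then emits dict hits in the fixed priority order.
import Mathlib
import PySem

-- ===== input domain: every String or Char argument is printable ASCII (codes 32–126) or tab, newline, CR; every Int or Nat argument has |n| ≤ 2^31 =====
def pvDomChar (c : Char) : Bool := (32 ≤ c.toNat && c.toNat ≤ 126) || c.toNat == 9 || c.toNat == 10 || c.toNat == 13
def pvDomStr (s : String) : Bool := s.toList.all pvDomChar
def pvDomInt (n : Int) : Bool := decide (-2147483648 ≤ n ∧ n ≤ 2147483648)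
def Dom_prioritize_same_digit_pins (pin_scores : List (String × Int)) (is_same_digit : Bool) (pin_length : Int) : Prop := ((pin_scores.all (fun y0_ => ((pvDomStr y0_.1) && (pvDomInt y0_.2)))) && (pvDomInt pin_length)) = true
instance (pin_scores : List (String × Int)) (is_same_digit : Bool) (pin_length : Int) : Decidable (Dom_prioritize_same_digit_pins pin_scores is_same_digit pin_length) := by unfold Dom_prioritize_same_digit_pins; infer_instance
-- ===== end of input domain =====

-- B replaces A's ten linear scans over pin_scores with one pass (dict of first occurrences
-- of priority pins + list of non-priority pairs); objective: faster (constant factor).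

-- ===== PORT A =====
-- the inner 'for pin, score in pin_scores: if pin == p_pin: append; break' loop of A
def pvFirstMatchA (pin_scores : List (String × Int)) (p_pin : String) : List (String × Int) :=
  match pin_scores with
  | [] => []
  | (pin, score) :: rest =>
      if pin == p_pin then [(pin, score)] else pvFirstMatchA rest p_pin

def prioritize_same_digit_pins (pin_scores : List (String × Int)) (is_same_digit : Bool) (pin_length : Int) : List (String × Int) :=
  if !is_same_digit then pin_scores else
  let priority_pins : List String :=
    (PySem.List.pyRange 1 10 1).map
      (fun d => String.ofList (PySem.List.pyRepeat (PySem.Int.toStr d).toList pin_length))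
      ++ [String.ofList (PySem.List.pyRepeat ['0'] pin_length)]
  let non_priority_pins : List (String × Int) :=
    pin_scores.foldl (fun acc pr => if priority_pins.contains pr.1 then acc else acc ++ [pr]) []
  let prioritized_scores : List (String × Int) :=
    priority_pins.foldl (fun acc p_pin => acc ++ pvFirstMatchA pin_scores p_pin) []
  prioritized_scores ++ non_priority_pins

-- ===== PORT B =====
def prioritize_same_digit_pins_alt (pin_scores : List (String × Int)) (is_same_digit : Bool) (pin_length : Int) : List (String × Int) :=
  if !is_same_digit then pin_scores else
  let priority_pins : List String :=
    (PySem.List.pyRange 1 10 1).map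
      (fun d => String.ofList (PySem.List.pyRepeat (PySem.Int.toStr d).toList pin_length))
      ++ [String.ofList (PySem.List.pyRepeat ['0'] pin_length)]
  let pset : PySem.Set String := PySem.Set.ofList priority_pins
  let st : PySem.Dict String (String × Int) × List (String × Int) :=
    pin_scores.foldl
      (fun st pr =>
        if PySem.Set.contains pset pr.1 then
          (if st.1.contains pr.1 then st.1 else st.1.insert pr.1 pr, st.2)
        else
          (st.1, st.2 ++ [pr]))
      (PySem.Dict.empty, [])
  priority_pins.foldl
    (fun acc p => match st.1.get? p with | some v => acc ++ [v] | none => acc) []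
  ++ st.2

-- ===== PRECONDITION & SPEC =====
def Spec_prioritize_same_digit_pins (pin_scores : List (String × Int)) (is_same_digit : Bool) (pin_length : Int) (out : List (String × Int)) : Prop := out = prioritize_same_digit_pins_alt pin_scores is_same_digit pin_length
instance (pin_scores : List (String × Int)) (is_same_digit : Bool) (pin_length : Int) (out : List (String × Int)) : Decidable (Spec_prioritize_same_digit_pins pin_scores is_same_digit pin_length out) := by unfold Spec_prioritize_same_digit_pins; infer_instance

-- ===== CLAIM (what is proved, stated in full; the proofs are below) =====
def Claim_equal_prioritize_same_digit_pins : Prop := ∀ (pin_scores : List (String × Int)) (is_same_digit : Bool) (pin_length : Int), Dom_prioritize_same_digit_pins pin_scores is_same_digit pin_length → Spec_prioritize_same_digit_pins pin_scores is_same_digit pin_length (prioritize_same_digit_pins pin_scores is_same_digit pin_length)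

-- ===== LEMMAS AND PROOFS =====

-- membership in set(P) coincides with membership in P
lemma pv_set_contains (P : List String) (x : String) :
    PySem.Set.contains (PySem.Set.ofList P) x = P.contains x := by
  simp [PySem.Set.contains, PySem.Set.mem_ofList]

-- B's single pass, second component = A's first loop
lemma pv_snd_eq (P : List String) (ps : List (String × Int))
    (d : PySem.Dict String (String × Int)) (acc : List (String × Int)) :
    (ps.foldl
      (fun st pr =>
        if PySem.Set.contains (PySem.Set.ofList P) pr.1 then
          (if (st : PySem.Dict String (String × Int) × List (String × Int)).1.contains pr.1 then st.1 else st.1.insert pr.1 pr, st.2)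
        else
          (st.1, st.2 ++ [pr]))
      (d, acc)).2
    = ps.foldl (fun acc pr => if P.contains pr.1 then acc else acc ++ [pr]) acc := by
  induction ps generalizing d acc with
  | nil => rfl
  | cons pr rest ih =>
    by_cases h : P.contains pr.1
    · have h2 : PySem.Set.contains (PySem.Set.ofList P) pr.1 = true := by
        rw [pv_set_contains]; exact h
      simp only [List.foldl_cons, h2, h, if_true]
      exact ih _ _
    · have h2 : PySem.Set.contains (PySem.Set.ofList P) pr.1 = false := by
        rw [pv_set_contains]; exact eq_false_of_ne_true h
      simp only [List.foldl_cons, h2, eq_false_of_ne_true h, Bool.false_eq_true, if_false]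
      exact ih _ _

-- B's single pass, dict lookup at a priority pin = A's break-on-first scan
lemma pv_fst_get (P : List String) (ps : List (String × Int)) (p : String)
    (hp : P.contains p = true) :
    ∀ (d : PySem.Dict String (String × Int)) (acc : List (String × Int)),
    ((ps.foldl
      (fun st pr =>
        if PySem.Set.contains (PySem.Set.ofList P) pr.1 then
          (if (st : PySem.Dict String (String × Int) × List (String × Int)).1.contains pr.1 then st.1 else st.1.insert pr.1 pr, st.2)
        else
          (st.1, st.2 ++ [pr]))
      (d, acc)).1).get? p
    = (d.get? p).or (pvFirstMatchA ps p).head? := by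
  induction ps with
  | nil => intro d acc; simp [pvFirstMatchA]
  | cons pr rest ih =>
    intro d acc
    obtain ⟨pin, score⟩ := pr
    simp only [List.foldl_cons, pvFirstMatchA]
    by_cases hmem : P.contains pin
    · have h2 : PySem.Set.contains (PySem.Set.ofList P) pin = true := by
        rw [pv_set_contains]; exact hmem
      simp only [h2, if_true]
      by_cases hc : d.contains pin
      · simp only [hc, if_true]
        by_cases hpq : pin = p
        · subst hpq
          rw [ih d acc]
          have hs : (d.get? pin).isSome := by
            rw [← PySem.Dict.contains_eq_isSome_get?]; exact hc
          obtain ⟨v, hv⟩ := Option.isSome_iff_exists.mp hs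
          simp [hv]
        · simp only [beq_iff_eq, hpq, if_false]
          exact ih d acc
      · simp only [hc, Bool.false_eq_true, if_false]
        by_cases hpq : pin = p
        · subst hpq
          rw [ih (d.insert pin (pin, score)) acc]
          have hn : d.get? pin = none := by
            have h3 := PySem.Dict.contains_eq_isSome_get? (d := d) (k := pin)
            have h4 : (d.get? pin).isSome = false := by
              rw [← h3]; exact eq_false_of_ne_true hc
            exact Option.not_isSome_iff_eq_none.mp (by simp [h4])
          simp [PySem.Dict.get?_insert_self, hn]
        · simp only [beq_iff_eq, hpq, if_false]
          rw [ih (d.insert pin (pin, score)) acc]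
          rw [PySem.Dict.get?_insert_of_ne _ _ (fun h => hpq h.symm)]
    · have h2 : PySem.Set.contains (PySem.Set.ofList P) pin = false := by
        rw [pv_set_contains]; exact eq_false_of_ne_true hmem
      simp only [h2, Bool.false_eq_true, if_false]
      have hpq : pin ≠ p := by
        intro h; subst h; exact hmem hp
      simp only [beq_iff_eq, hpq, if_false]
      exact ih d (acc ++ [(pin, score)])

lemma pv_match_head (ps : List (String × Int)) (p : String) (acc : List (String × Int)) :
    (match (pvFirstMatchA ps p).head? with | some v => acc ++ [v] | none => acc)
    = acc ++ pvFirstMatchA ps p := by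
  induction ps with
  | nil => simp [pvFirstMatchA]
  | cons pr rest ih =>
    obtain ⟨pin, score⟩ := pr
    simp only [pvFirstMatchA]
    by_cases h : pin == p
    · simp [h]
    · simp only [h, Bool.false_eq_true, if_false]
      exact ih

-- ===== VERDICT (by name: the statement is the Claim_ definition above) =====
theorem prioritize_same_digit_pins_spec : Claim_equal_prioritize_same_digit_pins := by
  intro ps b L _
  unfold Spec_prioritize_same_digit_pins prioritize_same_digit_pins prioritize_same_digit_pins_alt
  cases b with
  | false => rfl
  | true =>
    simp only [Bool.not_true, Bool.false_eq_true, if_false]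
    rw [pv_snd_eq]
    congr 1
    apply PySem.List.foldl_congr_mem
    · intro acc p hpmem
      rw [pv_fst_get _ ps p (List.contains_iff_mem.mpr hpmem) PySem.Dict.empty []]
      have : (PySem.Dict.empty : PySem.Dict String (String × Int)).get? p = none := rfl
      rw [this, Option.none_or]
      exact (pv_match_head ps p acc).symm
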